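-- pv_equiv track=rewrite | github.com/anthonypoppleton653-png/S.L.A.T.E-ATHENA | slate/slate_prompt_compress.py | compress_code_comments
-- ===== SOURCE A (Python) =====
-- def compress_code_comments(text: str) -> str:
--     """Reduce verbose code comments while keeping essential ones."""
--     lines = text.split('\n')
--     result = []
--     comment_block = []
--
--     for line in lines:
--         stripped = line.strip()
--         if stripped.startswith('#') and not stripped.startswith('#!'):
--             comment_block.append(line)
--         else:
--             if comment_block:
--                 # Keep only first and last line of long comment blocks
--                 if len(comment_block) > 3:
--                     result.append(comment_block[0])
--                     result.append(comment_block[-1])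
--                 else:
--                     result.extend(comment_block)
--                 comment_block = []
--             result.append(line)
--
--     if comment_block:
--         if len(comment_block) > 3:
--             result.append(comment_block[0])
--             result.append(comment_block[-1])
--         else:
--             result.extend(comment_block)
--
--     return '\n'.join(result)
-- ===== SOURCE B (Python) =====
-- def _is_comment(line: str) -> bool:
--     s = line.strip()
--     return s.startswith('#') and not s.startswith('#!')
--
-- def compress_code_comments(text: str) -> str:
--     # Per-line local decision: drop a line iff it is a comment line that is the
--     # interior of a comment run of length > 3, detected from a 5-line window of
--     # comment flags (neighbours are comments, and a line two away is a comment).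
--     lines = text.split('\n')
--     n = len(lines)
--     out = []
--     p2 = p1 = False
--     for i, line in enumerate(lines):
--         c = _is_comment(line)
--         n1 = i + 1 < n and _is_comment(lines[i + 1])
--         n2 = i + 2 < n and _is_comment(lines[i + 2])
--         if not (p1 and c and n1 and (p2 or n2)):
--             out.append(line)
--         p2, p1 = p1, c
--     return '\n'.join(out)
-- ===== Notes on version B (the rewrite author's own statement) =====
-- stated objective: alternative
-- what changed: Replaced A's run-buffering (accumulate comment_block, flush twice) by a bufferless per-line filter: each line is kept or dropped by a purely local 5-line sliding window of comment flags (drop iff both neighbours are comments and a line two away is a comment), which characterises being interior to a comment run of length > 3.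
import Mathlib
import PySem

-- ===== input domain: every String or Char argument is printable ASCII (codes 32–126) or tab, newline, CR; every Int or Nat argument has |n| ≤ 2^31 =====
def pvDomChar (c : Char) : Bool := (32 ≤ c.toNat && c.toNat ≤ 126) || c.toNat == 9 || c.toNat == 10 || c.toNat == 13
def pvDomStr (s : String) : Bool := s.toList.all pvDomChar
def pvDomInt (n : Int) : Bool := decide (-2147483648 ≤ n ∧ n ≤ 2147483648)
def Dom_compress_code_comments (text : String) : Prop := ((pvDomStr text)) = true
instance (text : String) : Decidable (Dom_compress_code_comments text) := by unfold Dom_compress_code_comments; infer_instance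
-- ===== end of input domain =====

-- B replaces A's accumulate-and-flush run buffer by a bufferless per-line filter that
-- drops a line based on a local 5-line window of comment flags (same cost; alternative).

-- ===== PORT A =====
-- the loop over lines with state (result, comment_block); the duplicated flush code is kept inline
def pvLoopA : List String → List String → List String → List String
  | [], result, comment_block =>
      if comment_block.isEmpty then result
      else if 3 < PySem.List.len comment_block then
        result ++ [PySem.List.pyGetD comment_block 0 "", PySem.List.pyGetD comment_block (-1) ""]
      else result ++ comment_block
  | line :: rest, result, comment_block =>
      if PySem.Str.startswith (PySem.Str.strip line) "#"
          && !PySem.Str.startswith (PySem.Str.strip line) "#!" then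
        pvLoopA rest result (comment_block ++ [line])
      else if comment_block.isEmpty then
        pvLoopA rest (result ++ [line]) []
      else if 3 < PySem.List.len comment_block then
        pvLoopA rest (result ++ [PySem.List.pyGetD comment_block 0 "",
                                 PySem.List.pyGetD comment_block (-1) ""] ++ [line]) []
      else
        pvLoopA rest (result ++ comment_block ++ [line]) []

def compress_code_comments (text : String) : String :=
  PySem.Str.join "\n" (pvLoopA ((PySem.Str.split? text "\n").getD []) [] [])

-- ===== PORT B =====
def pvIsComment (line : String) : Bool :=
  PySem.Str.startswith (PySem.Str.strip line) "#"
    && !PySem.Str.startswith (PySem.Str.strip line) "#!"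

-- Source B's loop: state (p2, p1) = comment flags of the two previous lines; the index
-- lookaheads lines[i+1], lines[i+2] are the first two elements of the remaining list
def pvWinB : Bool → Bool → List String → List String
  | _, _, [] => []
  | p2, p1, l :: rest =>
      let c := pvIsComment l
      let n1 := match rest with | x :: _ => pvIsComment x | [] => false
      let n2 := match rest with | _ :: y :: _ => pvIsComment y | _ => false
      (if p1 && c && n1 && (p2 || n2) then [] else [l]) ++ pvWinB p1 c rest

def compress_code_comments_alt (text : String) : String :=
  PySem.Str.join "\n" (pvWinB false false ((PySem.Str.split? text "\n").getD []))

-- ===== PRECONDITION & SPEC =====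
def Spec_compress_code_comments (text : String) (out : String) : Prop := out = compress_code_comments_alt text
instance (text : String) (out : String) : Decidable (Spec_compress_code_comments text out) := by unfold Spec_compress_code_comments; infer_instance

-- ===== CLAIM (what is proved, stated in full; the proofs are below) =====
def Claim_equal_compress_code_comments : Prop := ∀ (text : String), Dom_compress_code_comments text → Spec_compress_code_comments text (compress_code_comments text)

-- ===== LEMMAS AND PROOFS =====

-- proof-only intermediate form: both programs compute the run-compressed line list
def pvGroups : List String → List String
  | [] => []
  | l :: rest =>
      let k := pvIsComment l
      let g := l :: rest.takeWhile (fun x => pvIsComment x == k)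
      (if k && 3 < g.length then [l, g.getLast (by simp)] else g)
        ++ pvGroups (rest.dropWhile (fun x => pvIsComment x == k))
  termination_by lines => lines.length
  decreasing_by
    simp only [List.length_cons]
    exact Nat.lt_succ_of_le (List.length_dropWhile_le _ _)

-- running a block of comment lines only appends them to the pending comment_block
theorem pvLoopA_comments (cb : List String) (lines result cb0 : List String)
    (h : ∀ l ∈ cb, pvIsComment l = true) :
    pvLoopA (cb ++ lines) result cb0 = pvLoopA lines result (cb0 ++ cb) := by
  induction cb generalizing cb0 with
  | nil => simp
  | cons c cs ih =>
      have hc : pvIsComment c = true := h c (by simp)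
      have hcs : ∀ l ∈ cs, pvIsComment l = true := fun l hl => h l (by simp [hl])
      simp only [List.cons_append, pvLoopA]
      rw [if_pos (by simpa [pvIsComment] using hc), ih _ hcs]
      simp

-- a non-comment line is its own group
theorem pvGroups_cons_noncomment (l : String) (rest : List String)
    (h : pvIsComment l = false) :
    pvGroups (l :: rest) = l :: pvGroups rest := by
  cases rest with
  | nil => simp [pvGroups, h]
  | cons r rs =>
      by_cases hr : pvIsComment r = true
      · simp [pvGroups, h, hr]
      · simp only [Bool.not_eq_true] at hr
        conv_rhs => rw [pvGroups]
        simp [pvGroups, h, hr]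

theorem pvDropWhile_head_false {α : Type} (p : α → Bool) (xs : List α) (d : α)
    (ds' : List α) (h : xs.dropWhile p = d :: ds') : p d = false := by
  induction xs with
  | nil => simp [List.dropWhile] at h
  | cons x xs ih =>
      rw [List.dropWhile_cons] at h
      by_cases hx : p x = true
      · exact ih (by simpa [hx] using h)
      · simp only [Bool.not_eq_true] at hx
        simp only [hx, Bool.false_eq_true] at h
        cases h
        exact hx

theorem pvLoopA_eq_groups (n : Nat) :
    ∀ lines result, lines.length ≤ n → pvLoopA lines result [] = result ++ pvGroups lines := by
  induction n with
  | zero =>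
      intro lines result h
      have : lines = [] := List.length_eq_zero_iff.mp (Nat.le_zero.mp h)
      subst this
      simp [pvLoopA, pvGroups]
  | succ n ih =>
      intro lines result h
      cases lines with
      | nil => simp [pvLoopA, pvGroups]
      | cons l rest =>
        by_cases hl : pvIsComment l = true
        · -- comment run: absorb the takeWhile prefix into comment_block, then flush
          set t := rest.takeWhile pvIsComment with ht
          set ds := rest.dropWhile pvIsComment with hds
          have hrest : t ++ ds = rest := List.takeWhile_append_dropWhile
          have htc : ∀ x ∈ t, pvIsComment x = true := fun x hx => List.mem_takeWhile_imp hx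
          have step1 : pvLoopA (l :: rest) result [] = pvLoopA rest result [l] := by
            simp only [pvLoopA]
            rw [if_pos (by simpa [pvIsComment] using hl)]
            simp
          have step2 : pvLoopA rest result [l] = pvLoopA ds result (l :: t) := by
            conv_lhs => rw [← hrest]
            rw [pvLoopA_comments t ds result [l] htc]
            simp
          have hgrp : pvGroups (l :: rest) =
              (if 3 < (l :: t).length then [l, (l :: t).getLast (by simp)] else l :: t)
                ++ pvGroups ds := by
            rw [pvGroups]
            simp [hl, ← ht, ← hds]
          cases hd : ds with
          | nil =>
              rw [step1, step2, hd, hgrp, hd]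
              simp only [pvLoopA, pvGroups, List.append_nil]
              by_cases h3 : 3 < (l :: t).length
              · rw [if_neg (by simp : ¬((l :: t).isEmpty = true)),
                    if_pos (by simpa [PySem.List.len_eq] using h3), if_pos h3]
                simp [PySem.List.pyGetD_neg_one, PySem.List.pyGetD_zero_cons]
              · rw [if_neg (by simp : ¬((l :: t).isEmpty = true)),
                    if_neg (by simpa [PySem.List.len_eq] using h3), if_neg h3]
          | cons d ds' =>
              have hdnc : pvIsComment d = false :=
                pvDropWhile_head_false pvIsComment rest d ds' (hds ▸ hd)
              have hlen : ds'.length ≤ n := by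
                have h0 : ds'.length < ds.length := by simp [hd]
                have h1 : ds.length ≤ rest.length := hds ▸ List.length_dropWhile_le _ _
                have h2 : rest.length ≤ n := by simp at h; omega
                omega
              rw [step1, step2, hd]
              simp only [pvLoopA]
              rw [if_neg (by simpa [pvIsComment] using hdnc),
                  if_neg (by simp : ¬((l :: t).isEmpty = true))]
              by_cases h3 : 3 < (l :: t).length
              · rw [if_pos (by simpa [PySem.List.len_eq] using h3), ih ds' _ hlen, hgrp, hd,
                    pvGroups_cons_noncomment d ds' hdnc, if_pos h3]
                simp [PySem.List.pyGetD_neg_one, PySem.List.pyGetD_zero_cons]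
              · rw [if_neg (by simpa [PySem.List.len_eq] using h3), ih ds' _ hlen, hgrp, hd,
                    pvGroups_cons_noncomment d ds' hdnc, if_neg h3]
                simp
        · simp only [Bool.not_eq_true] at hl
          have step1 : pvLoopA (l :: rest) result [] = pvLoopA rest (result ++ [l]) [] := by
            simp only [pvLoopA]
            rw [if_neg (by simpa [pvIsComment] using hl)]
            simp
          have hlen : rest.length ≤ n := by simp at h; omega
          rw [step1, ih rest _ hlen, pvGroups_cons_noncomment l rest hl]
          simp

-- ===== B-side lemmas: the window filter also computes pvGroups =====

-- once p1 = false, the state p2 is irrelevant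
theorem pvWinB_p1_false (a : Bool) (xs : List String) :
    pvWinB a false xs = pvWinB false false xs := by
  cases xs <;> simp [pvWinB]

-- after a non-comment (or at the end), the state resets
theorem pvWinB_bdry (a b : Bool) (ds : List String)
    (h : ds = [] ∨ ∃ d ds', ds = d :: ds' ∧ pvIsComment d = false) :
    pvWinB a b ds = pvWinB false false ds := by
  rcases h with rfl | ⟨d, ds', rfl, hd⟩
  · rfl
  · simp [pvWinB, hd, pvWinB_p1_false]

-- deep inside a run (both previous lines comments), only the run's last line survives
theorem pvWinB_run (x : String) (t ds : List String)
    (hx : pvIsComment x = true) (ht : ∀ y ∈ t, pvIsComment y = true)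
    (hds : ds = [] ∨ ∃ d ds', ds = d :: ds' ∧ pvIsComment d = false) :
    pvWinB true true (x :: t ++ ds) =
      (x :: t).getLast (by simp) :: pvWinB false false ds := by
  induction t generalizing x with
  | nil =>
      rcases hds with rfl | ⟨d, ds', rfl, hd⟩
      · simp [pvWinB, hx]
      · simp [pvWinB, hx, hd, pvWinB_p1_false]
  | cons y t' ih =>
      have hy : pvIsComment y = true := ht y (by simp)
      have ht' : ∀ z ∈ t', pvIsComment z = true := fun z hz => ht z (by simp [hz])
      have := ih y hy ht'
      simp only [List.cons_append, pvWinB, hx, hy] at this ⊢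
      simpa [List.getLast_cons] using this

theorem pvWinB_eq_groups (n : Nat) :
    ∀ lines, lines.length ≤ n → pvWinB false false lines = pvGroups lines := by
  induction n with
  | zero =>
      intro lines h
      have : lines = [] := List.length_eq_zero_iff.mp (Nat.le_zero.mp h)
      subst this
      simp [pvWinB, pvGroups]
  | succ n ih =>
      intro lines h
      cases lines with
      | nil => simp [pvWinB, pvGroups]
      | cons l rest =>
        have hlen : rest.length ≤ n := by simp at h; omega
        by_cases hl : pvIsComment l = true
        · set t := rest.takeWhile pvIsComment with htk
          set ds := rest.dropWhile pvIsComment with hds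
          have hrest : t ++ ds = rest := List.takeWhile_append_dropWhile
          have htc : ∀ x ∈ t, pvIsComment x = true := fun x hx => List.mem_takeWhile_imp hx
          have hb : ds = [] ∨ ∃ d ds', ds = d :: ds' ∧ pvIsComment d = false := by
            cases hd : ds with
            | nil => exact Or.inl rfl
            | cons d ds' =>
                exact Or.inr ⟨d, ds', rfl, pvDropWhile_head_false pvIsComment rest d ds' (hds ▸ hd)⟩
          have hdsg : pvWinB false false ds = pvGroups ds := by
            apply ih
            calc ds.length ≤ rest.length := hds ▸ List.length_dropWhile_le _ _
              _ ≤ n := hlen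
          have hgrp : pvGroups (l :: rest) =
              (if 3 < (l :: t).length then [l, (l :: t).getLast (by simp)] else l :: t)
                ++ pvGroups ds := by
            rw [pvGroups]
            simp [hl, ← htk, ← hds]
          -- first line of the run: p1 = false, always kept
          have step0 : pvWinB false false (l :: rest) = l :: pvWinB false true rest := by
            simp [pvWinB, hl]
          clear_value t ds
          rw [step0, hgrp]
          conv_lhs => rw [← hrest]
          cases t with
          | nil =>
              rw [List.nil_append, pvWinB_bdry _ _ _ hb, hdsg]
              simp
          | cons x t1 =>
            have hx : pvIsComment x = true := htc x (by simp)
            cases t1 with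
            | nil =>
                -- run of length 2: x kept (lookahead n1 hits the boundary)
                rcases hb with rfl | ⟨d, ds', rfl, hd⟩
                · simp [pvWinB, hx, pvGroups]
                · have h1 : pvWinB false true (x :: d :: ds') =
                      x :: pvWinB true true (d :: ds') := by
                    simp [pvWinB, hx, hd]
                  rw [List.cons_append, List.nil_append, h1,
                      pvWinB_bdry _ _ _ (Or.inr ⟨d, ds', rfl, hd⟩), hdsg]
                  simp
            | cons y t2 =>
              have hy : pvIsComment y = true := htc y (by simp)
              cases t2 with
              | nil =>
                  -- run of length 3: x kept (n2 hits the boundary), y kept by pvWinB_run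
                  rcases hb with rfl | ⟨d, ds', rfl, hd⟩
                  · simp [pvWinB, hx, hy, pvGroups]
                  · have h1 : pvWinB false true (x :: y :: d :: ds') =
                        x :: pvWinB true true (y :: d :: ds') := by
                      simp [pvWinB, hx, hy, hd]
                    have hrun := pvWinB_run y [] (d :: ds') hy (by simp)
                      (Or.inr ⟨d, ds', rfl, hd⟩)
                    simp only [List.cons_append, List.nil_append] at hrun ⊢
                    rw [h1, hrun, hdsg]
                    simp
              | cons z t3 =>
                  -- run of length ≥ 4: interior dropped, last kept
                  have hz : pvIsComment z = true := htc z (by simp)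
                  have hrun := pvWinB_run y (z :: t3) ds hy
                    (fun w hw => htc w (by simp [hw])) hb
                  simp only [List.cons_append] at hrun ⊢
                  have hstep : pvWinB false true (x :: (y :: (z :: (t3 ++ ds)))) =
                      pvWinB true true (y :: (z :: (t3 ++ ds))) := by
                    simp [pvWinB, hx, hy, hz]
                  rw [hstep, hrun, hdsg]
                  have h4 : 3 < (l :: x :: y :: z :: t3).length := by simp
                  rw [if_pos h4]
                  simp [List.getLast_cons]
        · simp only [Bool.not_eq_true] at hl
          have step : pvWinB false false (l :: rest) = l :: pvWinB false false rest := by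
            simp [pvWinB, hl]
          rw [step, ih rest hlen, pvGroups_cons_noncomment l rest hl]

-- ===== VERDICT (by name: the statement is the Claim_ definition above) =====
theorem compress_code_comments_spec : Claim_equal_compress_code_comments := by
  intro text _
  unfold Spec_compress_code_comments compress_code_comments compress_code_comments_alt
  rw [pvLoopA_eq_groups ((PySem.Str.split? text "\n").getD []).length _ _ (le_refl _),
      pvWinB_eq_groups ((PySem.Str.split? text "\n").getD []).length _ (le_refl _)]
  simp
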